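-- pv_equiv track=rewrite | github.com/SoyITPro/scripts | miscellany/wordpress_sql_to_hugo.py | split_tuples
-- ===== SOURCE A (Python) =====
-- def split_tuples(s):
--     tuples = []
--     depth = 0
--     in_string = False
--     escape = False
--     start = None
--
--     for i, ch in enumerate(s):
--         if in_string:
--             if escape:
--                 escape = False
--             elif ch == "\\":
--                 escape = True
--             elif ch == "'":
--                 in_string = False
--         else:
--             if ch == "'":
--                 in_string = True
--             elif ch == "(":
--                 if depth == 0:
--                     start = i
--                 depth += 1
--             elif ch == ")":
--                 depth -= 1
--                 if depth == 0 and start is not None: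
--                     tuples.append(s[start:i+1])
--
--     return tuples
-- ===== SOURCE B (Python) =====
-- def _string_mask(s):
--     # mask[i] is True iff the quote/escape state machine is "inside a string
--     # literal" when it reaches character i
--     mask = []
--     in_string = False
--     escape = False
--     for ch in s:
--         mask.append(in_string)
--         if in_string:
--             if escape:
--                 escape = False
--             elif ch == "\\":
--                 escape = True
--             elif ch == "'":
--                 in_string = False
--         elif ch == "'":
--             in_string = True
--     return mask
--
--
-- def split_tuples(s):
--     masked = _string_mask(s)
--     # only unmasked parentheses matter for the tuple boundaries
--     parens = [(i, ch) for i, ch in enumerate(s) if not masked[i] and ch in "()"]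
--     tuples = []
--     depth = 0
--     start = None
--     for i, ch in parens:
--         if ch == "(":
--             if depth == 0:
--                 start = i
--             depth += 1
--         else:
--             depth -= 1
--             if depth == 0 and start is not None:
--                 tuples.append(s[start:i+1])
--     return tuples
-- ===== Notes on version B (the rewrite author's own statement) =====
-- stated objective: alternative
-- what changed: A's single fused loop is split into two passes: a first pass running only the quote/escape state machine to build a boolean mask of characters inside SQL string literals, and a second pass doing the depth/paren tuple extraction over the unmasked characters.
import Mathlib
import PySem

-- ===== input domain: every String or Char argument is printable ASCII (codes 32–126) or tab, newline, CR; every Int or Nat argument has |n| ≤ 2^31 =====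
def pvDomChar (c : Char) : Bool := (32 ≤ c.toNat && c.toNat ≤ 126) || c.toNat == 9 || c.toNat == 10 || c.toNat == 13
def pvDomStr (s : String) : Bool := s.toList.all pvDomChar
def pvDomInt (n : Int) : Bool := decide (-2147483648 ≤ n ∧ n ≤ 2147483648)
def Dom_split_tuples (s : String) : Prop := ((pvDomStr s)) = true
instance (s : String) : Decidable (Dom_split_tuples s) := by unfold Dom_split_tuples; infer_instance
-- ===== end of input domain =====

-- B replaces A's single fused loop by two passes (a string-literal mask, then a depth scan
-- over the unmasked parentheses only) — a different decomposition, not faster.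

-- ===== PORT A =====
-- A's single loop; state (tuples, depth, in_string, escape, start), i the running index,
-- src the full char list (for the slice s[start:i+1]).
def splitTuplesLoopA (src : List Char) : List Char → Nat → List String → Int → Bool → Bool →
    Option Nat → List String
  | [], _, tuples, _, _, _, _ => tuples
  | ch :: rest, i, tuples, depth, ins, esc, start =>
    if ins then
      if esc then splitTuplesLoopA src rest (i + 1) tuples depth ins false start
      else if ch = '\\' then splitTuplesLoopA src rest (i + 1) tuples depth ins true start
      else if ch = '\'' then splitTuplesLoopA src rest (i + 1) tuples depth false esc start
      else splitTuplesLoopA src rest (i + 1) tuples depth ins esc start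
    else
      if ch = '\'' then splitTuplesLoopA src rest (i + 1) tuples depth true esc start
      else if ch = '(' then
        splitTuplesLoopA src rest (i + 1) tuples (depth + 1) ins esc
          (if depth = 0 then some i else start)
      else if ch = ')' then
        splitTuplesLoopA src rest (i + 1)
          (if depth - 1 = 0 then
            match start with
            | some st =>
              tuples ++ [String.ofList (PySem.List.slice src (some (st : Int)) (some ((i : Int) + 1)))]
            | none => tuples
           else tuples)
          (depth - 1) ins esc start
      else splitTuplesLoopA src rest (i + 1) tuples depth ins esc start

def split_tuples (s : String) : List String :=
  splitTuplesLoopA s.toList s.toList 0 [] 0 false false none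

-- ===== PORT B =====
-- pass 1: the quote/escape state machine alone, emitting the in_string flag per character
def stringMask : List Char → Bool → Bool → List Bool
  | [], _, _ => []
  | ch :: rest, ins, esc =>
    ins ::
      (if ins then
        if esc then stringMask rest ins false
        else if ch = '\\' then stringMask rest ins true
        else if ch = '\'' then stringMask rest false esc
        else stringMask rest ins esc
      else if ch = '\'' then stringMask rest true esc
      else stringMask rest ins esc)

-- the comprehension: indexed characters that are unmasked parentheses
def parenEvents (pairs : List (Char × Bool)) (i : Nat) : List (Nat × Char) :=
  match pairs with
  | [] => []
  | (ch, m) :: rest =>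
    if ¬ m ∧ (ch = '(' ∨ ch = ')') then (i, ch) :: parenEvents rest (i + 1)
    else parenEvents rest (i + 1)

-- pass 2: depth scan over the paren events only
def parenScan (src : List Char) : List (Nat × Char) → List String → Int → Option Nat → List String
  | [], tuples, _, _ => tuples
  | (i, ch) :: rest, tuples, depth, start =>
    if ch = '(' then
      parenScan src rest tuples (depth + 1) (if depth = 0 then some i else start)
    else
      parenScan src rest
        (if depth - 1 = 0 then
          match start with
          | some st =>
            tuples ++ [String.ofList (PySem.List.slice src (some (st : Int)) (some ((i : Int) + 1)))]
          | none => tuples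
         else tuples)
        (depth - 1) start

def split_tuples_alt (s : String) : List String :=
  parenScan s.toList
    (parenEvents (s.toList.zip (stringMask s.toList false false)) 0) [] 0 none

-- ===== PRECONDITION & SPEC =====
def Spec_split_tuples (s : String) (out : List String) : Prop := out = split_tuples_alt s
instance (s : String) (out : List String) : Decidable (Spec_split_tuples s out) := by unfold Spec_split_tuples; infer_instance

-- ===== CLAIM (what is proved, stated in full; the proofs are below) =====
def Claim_equal_split_tuples : Prop := ∀ (s : String), Dom_split_tuples s → Spec_split_tuples s (split_tuples s)

-- ===== LEMMAS AND PROOFS =====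
theorem loopA_eq_scan (src : List Char) (cs : List Char) (i : Nat) (tuples : List String)
    (depth : Int) (ins esc : Bool) (start : Option Nat) :
    splitTuplesLoopA src cs i tuples depth ins esc start =
      parenScan src (parenEvents (cs.zip (stringMask cs ins esc)) i) tuples depth start := by
  induction cs generalizing i tuples depth ins esc start with
  | nil => simp [splitTuplesLoopA, stringMask, parenEvents, parenScan]
  | cons ch rest ih =>
    by_cases hins : ins <;> by_cases hesc : esc <;>
      by_cases h1 : ch = '\\' <;> by_cases h2 : ch = '\'' <;>
      by_cases h3 : ch = '(' <;> by_cases h4 : ch = ')' <;>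
      simp only [hins, hesc, h1, h2, h3, h4, stringMask, splitTuplesLoopA, List.zip_cons_cons,
        parenEvents, ih, if_true, if_false] <;>
      simp_all [parenScan]

-- ===== VERDICT (by name: the statement is the Claim_ definition above) =====
theorem split_tuples_spec : Claim_equal_split_tuples := by
  intro s _
  unfold Spec_split_tuples split_tuples split_tuples_alt
  exact loopA_eq_scan _ _ _ _ _ _ _ _
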